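-- pv_equiv track=rewrite | github.com/oleg-ilin/algorithms_gb | les05_task02.py | func_res_16
-- ===== SOURCE A (Python) =====
-- def func_res_16(res):
--     res = res[::-1]
--     res_16 = []
--     for el in res:
--         for key, value in my_dict.items():
--             if el == value:
--                 res_16.append(key)
--     return res_16
--
-- my_dict = {'0' : 0, '1': 1, '2': 2, '3': 3, '4': 4, '5': 5, '6': 6, '7': 7, '8': 8, '9': 9,
--            'A': 10, 'B': 11, 'C': 12, 'D': 13, 'E': 14, 'F': 15
--            }
-- ===== SOURCE B (Python) =====
-- def func_res_16(res):
--     # No table at all: values 0..15 are their own hex digits, computed by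
--     # integer formatting; filter in a forward pass, reverse once at the end.
--     return [format(el, 'X') for el in res if 0 <= el < 16][::-1]
-- ===== Notes on version B (the rewrite author's own statement) =====
-- stated objective: faster
-- what changed: Drops the lookup table entirely: B computes each hex digit arithmetically with format(el,'X') for 0 <= el < 16 in one forward filtering pass and reverses the result once at the end, instead of A's reverse-first traversal with a 16-entry dict scan per element.
import Mathlib
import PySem

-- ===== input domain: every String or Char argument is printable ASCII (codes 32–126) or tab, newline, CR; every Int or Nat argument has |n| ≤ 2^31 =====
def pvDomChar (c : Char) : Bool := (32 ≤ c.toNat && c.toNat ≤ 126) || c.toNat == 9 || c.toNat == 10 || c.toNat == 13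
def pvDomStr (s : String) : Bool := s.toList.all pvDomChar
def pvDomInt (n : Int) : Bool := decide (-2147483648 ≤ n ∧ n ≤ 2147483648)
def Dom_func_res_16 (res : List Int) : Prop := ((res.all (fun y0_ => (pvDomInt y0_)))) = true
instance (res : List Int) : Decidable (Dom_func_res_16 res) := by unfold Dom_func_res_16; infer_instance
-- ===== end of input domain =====

-- B drops the lookup table: each value 0..15 is its own hex digit, computed arithmetically
-- (format(el,'X')) in one forward filtering pass, with a single reversal at the end (faster, no dict).

-- ===== PORT A =====
def my_dict : PySem.Dict String Int :=
  PySem.Dict.ofList [("0",0),("1",1),("2",2),("3",3),("4",4),("5",5),("6",6),("7",7),("8",8),("9",9),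
                     ("A",10),("B",11),("C",12),("D",13),("E",14),("F",15)]

def func_res_16 (res : List Int) : List String :=
  -- res = res[::-1]
  let res' := (PySem.List.slice? res none none (-1)).getD []
  -- for el in res: for key, value in my_dict.items(): if el == value: res_16.append(key)
  res'.foldl (fun res_16 el =>
    (PySem.Dict.items my_dict).foldl (fun acc kv =>
      if el == kv.2 then acc ++ [kv.1] else acc) res_16) []

-- ===== PORT B =====
-- format(el, 'X'): ported by hand; exact for the 0 ≤ el < 16 range it is applied on.
def hexDigit (el : Int) : String :=
  String.mk [Char.ofNat (if el < 10 then 48 + el.toNat else 55 + el.toNat)]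

def func_res_16_alt (res : List Int) : List String :=
  -- [format(el,'X') for el in res if 0 <= el < 16][::-1]
  (res.filterMap (fun el =>
      if 0 ≤ el ∧ el < 16 then some (hexDigit el) else none)).reverse

-- ===== PRECONDITION & SPEC =====
def Spec_func_res_16 (res : List Int) (out : List String) : Prop := out = func_res_16_alt res
instance (res : List Int) (out : List String) : Decidable (Spec_func_res_16 res out) := by unfold Spec_func_res_16; infer_instance

-- ===== CLAIM (what is proved, stated in full; the proofs are below) =====
def Claim_equal_func_res_16 : Prop := ∀ (res : List Int), Dom_func_res_16 res → Spec_func_res_16 res (func_res_16 res)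

-- ===== LEMMAS AND PROOFS =====

-- A's inner scan over the 16 dict entries yields exactly B's arithmetic hex digit (or nothing).
lemma inner_eq (el : Int) :
    ((PySem.Dict.items my_dict).filter (fun kv => el == kv.2)).map (fun kv => kv.1)
      = (if 0 ≤ el ∧ el < 16 then some (hexDigit el) else none).toList := by
  by_cases h0 : el = 0
  · subst h0; decide
  by_cases h1 : el = 1
  · subst h1; decide
  by_cases h2 : el = 2
  · subst h2; decide
  by_cases h3 : el = 3
  · subst h3; decide
  by_cases h4 : el = 4
  · subst h4; decide
  by_cases h5 : el = 5
  · subst h5; decide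
  by_cases h6 : el = 6
  · subst h6; decide
  by_cases h7 : el = 7
  · subst h7; decide
  by_cases h8 : el = 8
  · subst h8; decide
  by_cases h9 : el = 9
  · subst h9; decide
  by_cases h10 : el = 10
  · subst h10; decide
  by_cases h11 : el = 11
  · subst h11; decide
  by_cases h12 : el = 12
  · subst h12; decide
  by_cases h13 : el = 13
  · subst h13; decide
  by_cases h14 : el = 14
  · subst h14; decide
  by_cases h15 : el = 15
  · subst h15; decide
  have hout : ¬ (0 ≤ el ∧ el < 16) := by omega
  have hit : PySem.Dict.items my_dict = [("0", (0:Int)), ("1", (1:Int)), ("2", (2:Int)), ("3", (3:Int)), ("4", (4:Int)), ("5", (5:Int)), ("6", (6:Int)), ("7", (7:Int)), ("8", (8:Int)), ("9", (9:Int)), ("A", (10:Int)), ("B", (11:Int)), ("C", (12:Int)), ("D", (13:Int)), ("E", (14:Int)), ("F", (15:Int))] := by decide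
  have e0 : (el == (0:Int)) = false := by
    simp only [beq_eq_false_iff_ne]; omega
  have e1 : (el == (1:Int)) = false := by
    simp only [beq_eq_false_iff_ne]; omega
  have e2 : (el == (2:Int)) = false := by
    simp only [beq_eq_false_iff_ne]; omega
  have e3 : (el == (3:Int)) = false := by
    simp only [beq_eq_false_iff_ne]; omega
  have e4 : (el == (4:Int)) = false := by
    simp only [beq_eq_false_iff_ne]; omega
  have e5 : (el == (5:Int)) = false := by
    simp only [beq_eq_false_iff_ne]; omega
  have e6 : (el == (6:Int)) = false := by
    simp only [beq_eq_false_iff_ne]; omega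
  have e7 : (el == (7:Int)) = false := by
    simp only [beq_eq_false_iff_ne]; omega
  have e8 : (el == (8:Int)) = false := by
    simp only [beq_eq_false_iff_ne]; omega
  have e9 : (el == (9:Int)) = false := by
    simp only [beq_eq_false_iff_ne]; omega
  have e10 : (el == (10:Int)) = false := by
    simp only [beq_eq_false_iff_ne]; omega
  have e11 : (el == (11:Int)) = false := by
    simp only [beq_eq_false_iff_ne]; omega
  have e12 : (el == (12:Int)) = false := by
    simp only [beq_eq_false_iff_ne]; omega
  have e13 : (el == (13:Int)) = false := by
    simp only [beq_eq_false_iff_ne]; omega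
  have e14 : (el == (14:Int)) = false := by
    simp only [beq_eq_false_iff_ne]; omega
  have e15 : (el == (15:Int)) = false := by
    simp only [beq_eq_false_iff_ne]; omega
  rw [hit, if_neg hout]
  simp [List.filter, e0, e1, e2, e3, e4, e5, e6, e7, e8, e9, e10, e11, e12, e13, e14, e15]

lemma flatMap_toList_eq_filterMap (l : List Int) (f : Int → Option String) :
    l.flatMap (fun el => (f el).toList) = l.filterMap f := by
  induction l with
  | nil => rfl
  | cons x xs ih =>
    simp only [List.flatMap_cons, List.filterMap_cons, ih]
    cases f x <;> simp

-- ===== VERDICT (by name: the statement is the Claim_ definition above) =====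
theorem func_res_16_spec : Claim_equal_func_res_16 := by
  intro res _
  show func_res_16 res = func_res_16_alt res
  unfold func_res_16 func_res_16_alt
  rw [PySem.List.slice?_none_none_neg_one]
  simp only [Option.getD_some]
  have hfun : (fun (res_16 : List String) (el : Int) =>
      (PySem.Dict.items my_dict).foldl (fun acc kv =>
        if el == kv.2 then acc ++ [kv.1] else acc) res_16)
      = (fun (acc : List String) (el : Int) =>
          acc ++ (if 0 ≤ el ∧ el < 16 then some (hexDigit el) else none).toList) := by
    funext acc el
    rw [PySem.List.foldl_append_if (p := fun kv : String × Int => el == kv.2)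
        (f := fun kv : String × Int => kv.1), inner_eq]
  rw [hfun, PySem.List.foldl_append_eq_flatMap]
  rw [flatMap_toList_eq_filterMap]
  rw [List.filterMap_reverse, List.nil_append]
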